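-- pv_equiv track=rewrite | github.com/unofficial-ladybird-builds/ladybird-bin | Meta/Utils/utils.py | camel_casify
-- ===== SOURCE A (Python) =====
-- def camel_casify(dashy_name: str) -> str:
--     parts = [part for part in dashy_name.split("-") if part]
--     if not parts:
--         return ""
--     result = [parts[0]]
--     for part in parts[1:]:
--         result.append(part[0].upper() + part[1:])
--     return "".join(result)
-- ===== SOURCE B (Python) =====
-- def camel_casify(dashy_name: str) -> str:
--     out = []
--     at_boundary = True
--     first_part_done = False
--     for ch in dashy_name:
--         if ch == "-":
--             at_boundary = True
--         elif at_boundary: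
--             out.append(ch if not first_part_done else ch.upper())
--             first_part_done = True
--             at_boundary = False
--         else:
--             out.append(ch)
--     return "".join(out)
-- ===== Notes on version B (the rewrite author's own statement) =====
-- stated objective: alternative
-- what changed: Replaces split('-')+filter+capitalize-parts list building with a single left-to-right character scan maintaining two flags (at_boundary, first_part_done), uppercasing exactly the first char after each dash once the first part has been emitted.
import Mathlib
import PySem

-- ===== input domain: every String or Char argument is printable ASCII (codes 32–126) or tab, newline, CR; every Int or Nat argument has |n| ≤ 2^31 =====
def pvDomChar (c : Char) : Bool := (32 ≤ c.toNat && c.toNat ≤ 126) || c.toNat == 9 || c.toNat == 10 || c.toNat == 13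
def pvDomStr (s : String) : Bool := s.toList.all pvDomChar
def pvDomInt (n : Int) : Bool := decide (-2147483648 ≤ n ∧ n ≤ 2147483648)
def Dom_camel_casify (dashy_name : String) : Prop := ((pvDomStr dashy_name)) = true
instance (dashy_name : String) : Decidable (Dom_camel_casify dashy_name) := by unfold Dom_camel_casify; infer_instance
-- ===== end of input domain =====

-- B replaces A's split('-')/filter/capitalize-parts pipeline by a single character scan
-- with two flags (objective: alternative single-pass decomposition, same cost).


-- ===== PORT A =====
-- part[0].upper() + part[1:]  (pyGet? cannot be none here: empty parts are filtered out)
def capPart (p : List Char) : List Char :=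
  (match PySem.List.pyGet? p 0 with
   | some c => PySem.Chars.upper [c]
   | none => []) ++ PySem.List.slice p (some 1) none

def camel_casify (dashy_name : String) : String :=
  let parts := (PySem.Chars.splitOn dashy_name.toList ['-']).filter (fun part => !part.isEmpty)
  match parts with
  | [] => ""
  | p0 :: rest =>
    let result := p0 :: rest.map capPart
    String.ofList (PySem.Chars.join [] result)

-- ===== PORT B =====
-- loop state: (at_boundary, first_part_done, out); out collects the appended strings
def altStep (st : Bool × Bool × List (List Char)) (ch : Char) : Bool × Bool × List (List Char) :=
  if ch = '-' then (true, st.2.1, st.2.2)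
  else if st.1 then (false, true, st.2.2 ++ [if st.2.1 then PySem.Chars.upper [ch] else [ch]])
  else (st.1, st.2.1, st.2.2 ++ [[ch]])

def camel_casify_alt (dashy_name : String) : String :=
  String.ofList (PySem.Chars.join [] (dashy_name.toList.foldl altStep (true, false, [])).2.2)

-- ===== PRECONDITION & SPEC =====
def Spec_camel_casify (dashy_name : String) (out : String) : Prop := out = camel_casify_alt dashy_name
instance (dashy_name : String) (out : String) : Decidable (Spec_camel_casify dashy_name out) := by unfold Spec_camel_casify; infer_instance

-- ===== CLAIM (what is proved, stated in full; the proofs are below) =====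
def Claim_equal_camel_casify : Prop := ∀ (dashy_name : String), Dom_camel_casify dashy_name → Spec_camel_casify dashy_name (camel_casify dashy_name)

-- ===== LEMMAS AND PROOFS =====

-- structural version of split on a single '-' : (first group, remaining groups)
def mySplit : List Char → List Char × List (List Char)
  | [] => ([], [])
  | c :: t =>
    let (g, gs) := mySplit t
    if c = '-' then ([], g :: gs) else (c :: g, gs)

theorem splitOn_go_eq (fuel : Nat) (l : List Char) (h : l.length < fuel)
    (cur : List Char) (acc : List (List Char)) :
    PySem.Chars.splitOn.go ['-'] fuel l cur acc =
      acc.reverse ++ ((cur.reverse ++ (mySplit l).1) :: (mySplit l).2) := by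
  induction fuel generalizing l cur acc with
  | zero => omega
  | succ fuel ih =>
    cases l with
    | nil => simp [PySem.Chars.splitOn.go, mySplit]
    | cons c t =>
      by_cases hc : c = '-'
      · subst hc
        have hp : List.isPrefixOf ['-'] ('-' :: t) = true := by
          simp [List.isPrefixOf]
        rw [show PySem.Chars.splitOn.go ['-'] (fuel+1) ('-'::t) cur acc
            = PySem.Chars.splitOn.go ['-'] fuel (List.drop 1 ('-'::t)) [] (cur.reverse :: acc) by
          simp [PySem.Chars.splitOn.go, hp]]
        rw [show List.drop 1 ('-'::t) = t from rfl,
            ih t (by simpa using Nat.lt_of_succ_lt_succ h) [] (cur.reverse :: acc)]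
        simp [mySplit]
      · have hp : List.isPrefixOf ['-'] (c :: t) = false := by
          simp [List.isPrefixOf]; exact fun h => hc h.symm
        rw [show PySem.Chars.splitOn.go ['-'] (fuel+1) (c::t) cur acc
            = PySem.Chars.splitOn.go ['-'] fuel t (c :: cur) acc by
          simp [PySem.Chars.splitOn.go, hp]]
        rw [ih t (by simpa using Nat.lt_of_succ_lt_succ h) (c :: cur) acc]
        simp [mySplit, hc]

theorem splitOn_eq_mySplit (l : List Char) :
    PySem.Chars.splitOn l ['-'] = (mySplit l).1 :: (mySplit l).2 := by
  have := splitOn_go_eq (l.length + 1) l (by omega) [] []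
  simpa [PySem.Chars.splitOn] using this

theorem join_nil_flatten (ps : List (List Char)) : PySem.Chars.join [] ps = ps.flatten := by
  induction ps with
  | nil => simp [PySem.Chars.join, List.intercalate]
  | cons p ps ih =>
    cases ps with
    | nil => simp [PySem.Chars.join, List.intercalate]
    | cons q qs =>
      simp only [PySem.Chars.join, List.intercalate] at *
      simp_all [List.intersperse]

theorem capPart_cons (c : Char) (t : List Char) :
    capPart (c :: t) = PySem.Chars.upper [c] ++ t := by
  simp [capPart, PySem.List.pyGet?, PySem.List.pyIdx?, PySem.List.slice_from_one]

-- remainder produced by B's scan from a given flag state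
def restB : List Char → Bool → Bool → List Char
  | [], _, _ => []
  | c :: t, ab, fd =>
    if c = '-' then restB t true fd
    else if ab then (if fd then PySem.Chars.upper [c] else [c]) ++ restB t false true
    else c :: restB t ab fd

theorem foldl_altStep (l : List Char) (ab fd : Bool) (out : List (List Char)) :
    (l.foldl altStep (ab, fd, out)).2.2.flatten = out.flatten ++ restB l ab fd := by
  induction l generalizing ab fd out with
  | nil => simp [restB]
  | cons c t ih =>
    by_cases hc : c = '-'
    · subst hc; simp [altStep, restB, ih]
    · cases ab with
      | false => simp [altStep, hc, restB, ih]
      | true => cases fd <;> simp [altStep, hc, restB, ih]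

def afterCap (gs : List (List Char)) : List Char :=
  ((gs.filter (fun p => !p.isEmpty)).map capPart).flatten

def aOut (l : List Char) : List Char :=
  match ((mySplit l).1 :: (mySplit l).2).filter (fun p => !p.isEmpty) with
  | [] => []
  | p :: ps => p ++ (ps.map capPart).flatten

theorem restB_triple (l : List Char) :
    restB l true false = aOut l ∧
    restB l true true = afterCap ((mySplit l).1 :: (mySplit l).2) ∧
    restB l false true = (mySplit l).1 ++ afterCap (mySplit l).2 := by
  induction l with
  | nil => simp [restB, aOut, afterCap, mySplit]
  | cons c t ih =>
    obtain ⟨ih1, ih2, ih3⟩ := ih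
    by_cases hc : c = '-'
    · subst hc
      refine ⟨?_, ?_, ?_⟩
      · rw [show restB ('-'::t) true false = restB t true false by simp [restB], ih1]
        simp [aOut, mySplit]
      · rw [show restB ('-'::t) true true = restB t true true by simp [restB], ih2]
        simp [afterCap, mySplit]
      · rw [show restB ('-'::t) false true = restB t true true by simp [restB], ih2]
        simp [afterCap, mySplit]
    · refine ⟨?_, ?_, ?_⟩
      · rw [show restB (c::t) true false = [c] ++ restB t false true by simp [restB, hc], ih3]
        simp [aOut, mySplit, hc, afterCap]
      · rw [show restB (c::t) true true = PySem.Chars.upper [c] ++ restB t false true by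
            simp [restB, hc], ih3]
        simp [afterCap, mySplit, hc, capPart_cons]
      · rw [show restB (c::t) false true = c :: restB t false true by simp [restB, hc], ih3]
        simp [afterCap, mySplit, hc]

-- ===== VERDICT (by name: the statement is the Claim_ definition above) =====
theorem camel_casify_spec : Claim_equal_camel_casify := by
  intro s _
  unfold Spec_camel_casify camel_casify camel_casify_alt
  rw [splitOn_eq_mySplit, join_nil_flatten, foldl_altStep]
  rw [(restB_triple s.toList).1]
  simp only [List.flatten_nil, List.nil_append, aOut]
  cases h : ((mySplit s.toList).1 :: (mySplit s.toList).2).filter (fun p => !p.isEmpty) with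
  | nil => simp
  | cons p ps => simp [join_nil_flatten]
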